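-- pv_equiv track=rewrite | github.com/omkhan021/MuslimBro | build_quran_db.py | get_juz
-- ===== SOURCE A (Python) =====
-- JUZ_STARTS = [
--     (1,1), (2,142), (2,253), (3,93), (4,24), (4,148), (5,82), (6,111),
--     (7,88), (8,41), (9,93), (11,6), (12,53), (15,1), (17,1), (18,75),
--     (21,1), (23,1), (25,21), (27,56), (29,46), (33,31), (36,28), (39,32),
--     (41,47), (46,1), (51,31), (58,1), (67,1), (78,1)
-- ]
--
-- def get_juz(surah, verse):
--     juz = 1
--     for i, (s, v) in enumerate(JUZ_STARTS):
--         if surah > s or (surah == s and verse >= v):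
--             juz = i + 1
--         else:
--             break
--     return juz
-- ===== SOURCE B (Python) =====
-- JUZ_STARTS = [
--     (1,1), (2,142), (2,253), (3,93), (4,24), (4,148), (5,82), (6,111),
--     (7,88), (8,41), (9,93), (11,6), (12,53), (15,1), (17,1), (18,75),
--     (21,1), (23,1), (25,21), (27,56), (29,46), (33,31), (36,28), (39,32),
--     (41,47), (46,1), (51,31), (58,1), (67,1), (78,1)
-- ]
--
-- def get_juz(surah, verse):
--     # binary search: number of start tuples <= (surah, verse), floored at 1
--     lo, hi = 0, len(JUZ_STARTS)
--     while lo < hi: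
--         mid = (lo + hi) // 2
--         s, v = JUZ_STARTS[mid]
--         if surah < s or (surah == s and verse < v):
--             hi = mid
--         else:
--             lo = mid + 1
--     return max(1, lo)
-- ===== Notes on version B (the rewrite author's own statement) =====
-- stated objective: alternative
-- what changed: Replaced the linear scan with break over JUZ_STARTS by a binary search (bisect_right by tuple order) returning max(1, idx), exploiting that the table is strictly increasing.
import Mathlib
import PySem

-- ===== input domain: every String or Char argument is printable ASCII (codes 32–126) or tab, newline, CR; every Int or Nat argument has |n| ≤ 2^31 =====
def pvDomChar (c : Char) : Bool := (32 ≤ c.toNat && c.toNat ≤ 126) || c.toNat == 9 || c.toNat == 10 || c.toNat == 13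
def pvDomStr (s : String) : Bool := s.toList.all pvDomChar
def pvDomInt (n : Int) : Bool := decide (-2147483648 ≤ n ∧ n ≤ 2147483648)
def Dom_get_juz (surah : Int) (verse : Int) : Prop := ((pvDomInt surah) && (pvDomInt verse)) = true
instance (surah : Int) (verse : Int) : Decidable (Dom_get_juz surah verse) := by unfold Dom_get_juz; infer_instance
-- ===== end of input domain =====

-- B replaces A's linear scan with break by a binary search over the sorted table (alternative algorithm, same result).

-- ===== PORT A =====
def JUZ_STARTS : List (Int × Int) := [
    (1,1), (2,142), (2,253), (3,93), (4,24), (4,148), (5,82), (6,111),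
    (7,88), (8,41), (9,93), (11,6), (12,53), (15,1), (17,1), (18,75),
    (21,1), (23,1), (25,21), (27,56), (29,46), (33,31), (36,28), (39,32),
    (41,47), (46,1), (51,31), (58,1), (67,1), (78,1)]

-- A's for-loop with break: i is the enumerate index, juz the accumulator
def juzLoop (surah verse : Int) : List (Int × Int) → Int → Int → Int
  | [], _, juz => juz
  | (s, v) :: rest, i, juz =>
    if surah > s ∨ (surah = s ∧ verse ≥ v) then juzLoop surah verse rest (i+1) (i+1)
    else juz

def get_juz (surah : Int) (verse : Int) : Int :=
  juzLoop surah verse JUZ_STARTS 0 1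

-- ===== PORT B =====
-- the while-loop of Source B; fuel only makes the recursion structural (30 ≥ any hi - lo used)
def bisectLoop (surah verse : Int) : Nat → Nat → Nat → Nat
  | 0, lo, _ => lo
  | fuel+1, lo, hi =>
    if lo < hi then
      if surah < (JUZ_STARTS.getD ((lo + hi) / 2) (0, 0)).1 ∨
         (surah = (JUZ_STARTS.getD ((lo + hi) / 2) (0, 0)).1 ∧
          verse < (JUZ_STARTS.getD ((lo + hi) / 2) (0, 0)).2) then
        bisectLoop surah verse fuel lo ((lo + hi) / 2)
      else bisectLoop surah verse fuel ((lo + hi) / 2 + 1) hi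
    else lo

def get_juz_alt (surah : Int) (verse : Int) : Int :=
  max 1 ((bisectLoop surah verse 30 0 JUZ_STARTS.length : Nat) : Int)

-- ===== PRECONDITION & SPEC =====
def Spec_get_juz (surah : Int) (verse : Int) (out : Int) : Prop := out = get_juz_alt surah verse
instance (surah : Int) (verse : Int) (out : Int) : Decidable (Spec_get_juz surah verse out) := by unfold Spec_get_juz; infer_instance

-- ===== CLAIM (what is proved, stated in full; the proofs are below) =====
def Claim_equal_get_juz : Prop := ∀ (surah : Int) (verse : Int), Dom_get_juz surah verse → Spec_get_juz surah verse (get_juz surah verse)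

-- ===== LEMMAS AND PROOFS =====

-- "entry i of the table is ≤ (surah, verse) in tuple order" (exactly A's loop condition at index i)
abbrev condI (surah verse : Int) (i : Nat) : Prop :=
  (JUZ_STARTS.getD i (0, 0)).1 < surah ∨
  (surah = (JUZ_STARTS.getD i (0, 0)).1 ∧ (JUZ_STARTS.getD i (0, 0)).2 ≤ verse)

-- first index ≥ k at which condI fails (30 if none): the common value of both loops
def ff (surah verse : Int) (k : Nat) : Nat :=
  if h : k < 30 then
    if condI surah verse k then ff surah verse (k + 1) else k
  else k
termination_by 30 - k

lemma juz_len : JUZ_STARTS.length = 30 := rfl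

-- the table is increasing in tuple order
lemma juz_sorted : ∀ j, j < 30 → ∀ i, i < j + 1 →
    (JUZ_STARTS.getD i (0, 0)).1 < (JUZ_STARTS.getD j (0, 0)).1 ∨
    ((JUZ_STARTS.getD i (0, 0)).1 = (JUZ_STARTS.getD j (0, 0)).1 ∧
     (JUZ_STARTS.getD i (0, 0)).2 ≤ (JUZ_STARTS.getD j (0, 0)).2) := by decide

lemma cond_mono (surah verse : Int) {i j : Nat} (hij : i ≤ j) (hj : j < 30)
    (h : condI surah verse j) : condI surah verse i := by
  have hp := juz_sorted j hj i (by omega)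
  unfold condI at h ⊢
  omega

lemma ff_unfold (surah verse : Int) (k : Nat) :
    ff surah verse k =
      if _h : k < 30 then
        (if condI surah verse k then ff surah verse (k + 1) else k)
      else k := by
  rw [ff]

lemma ff_ge (surah verse : Int) : ∀ m k, 30 - k ≤ m → k ≤ ff surah verse k := by
  intro m
  induction m with
  | zero =>
    intro k hk
    rw [ff_unfold, dif_neg (by omega : ¬ k < 30)]
  | succ m ih =>
    intro k hk
    rw [ff_unfold]
    by_cases h : k < 30
    · rw [dif_pos h]
      by_cases hc : condI surah verse k
      · rw [if_pos hc]
        have := ih (k + 1) (by omega)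
        omega
      · rw [if_neg hc]
    · rw [dif_neg h]

lemma ff_le (surah verse : Int) : ∀ m k, 30 - k ≤ m → k ≤ 30 → ff surah verse k ≤ 30 := by
  intro m
  induction m with
  | zero =>
    intro k h1 h2
    rw [ff_unfold, dif_neg (by omega : ¬ k < 30)]
    exact h2
  | succ m ih =>
    intro k h1 h2
    rw [ff_unfold]
    by_cases h : k < 30
    · rw [dif_pos h]
      by_cases hc : condI surah verse k
      · rw [if_pos hc]
        exact ih (k + 1) (by omega) (by omega)
      · rw [if_neg hc]
        omega
    · rw [dif_neg h]
      exact h2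

lemma ff_cond (surah verse : Int) : ∀ m k, 30 - k ≤ m →
    ∀ i, k ≤ i → i < ff surah verse k → condI surah verse i := by
  intro m
  induction m with
  | zero =>
    intro k hk i h1 h2
    rw [ff_unfold, dif_neg (by omega : ¬ k < 30)] at h2
    omega
  | succ m ih =>
    intro k hk i h1 h2
    rw [ff_unfold] at h2
    by_cases h : k < 30
    · rw [dif_pos h] at h2
      by_cases hc : condI surah verse k
      · rw [if_pos hc] at h2
        rcases Nat.eq_or_lt_of_le h1 with rfl | hlt
        · exact hc
        · exact ih (k + 1) (by omega) i (by omega) h2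
      · rw [if_neg hc] at h2
        omega
    · rw [dif_neg h] at h2
      omega

lemma ff_notcond_self (surah verse : Int) : ∀ m k, 30 - k ≤ m →
    ff surah verse k < 30 → ¬ condI surah verse (ff surah verse k) := by
  intro m
  induction m with
  | zero =>
    intro k hk hlt
    have he : ff surah verse k = k := by rw [ff_unfold, dif_neg (by omega : ¬ k < 30)]
    rw [he] at hlt
    omega
  | succ m ih =>
    intro k hk hlt
    by_cases h : k < 30
    · by_cases hc : condI surah verse k
      · have he : ff surah verse k = ff surah verse (k + 1) := by
          rw [ff_unfold, dif_pos h, if_pos hc]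
        rw [he] at hlt ⊢
        exact ih (k + 1) (by omega) hlt
      · have he : ff surah verse k = k := by rw [ff_unfold, dif_pos h, if_neg hc]
        rw [he]
        exact hc
    · have he : ff surah verse k = k := by rw [ff_unfold, dif_neg h]
      rw [he] at hlt
      exact absurd hlt h

lemma ff_notcond (surah verse : Int) (i : Nat) (h1 : ff surah verse 0 ≤ i) (h2 : i < 30) :
    ¬ condI surah verse i := by
  intro hc
  have hlt : ff surah verse 0 < 30 := by omega
  exact ff_notcond_self surah verse 30 0 (by omega) hlt
    (cond_mono surah verse h1 h2 hc)

lemma char_uniq (surah verse : Int) (r s : Nat)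
    (hr1 : ∀ i, i < r → condI surah verse i) (hr2 : r ≤ 30)
    (hr3 : ∀ i, r ≤ i → i < 30 → ¬ condI surah verse i)
    (hs1 : ∀ i, i < s → condI surah verse i) (hs2 : s ≤ 30)
    (hs3 : ∀ i, s ≤ i → i < 30 → ¬ condI surah verse i) : r = s := by
  rcases Nat.lt_trichotomy r s with h | h | h
  · exact absurd (hs1 r h) (hr3 r le_rfl (by omega))
  · exact h
  · exact ((hs3 s le_rfl (by omega)) (hr1 s h)).elim

-- A's loop, started at index k on the matching suffix, lands on ff k
lemma A_char (surah verse : Int) : ∀ m k (juz : Int), 30 - k ≤ m → k ≤ 30 →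
    juzLoop surah verse (JUZ_STARTS.drop k) (k : Int) juz =
      if ff surah verse k = k then juz else (ff surah verse k : Int) := by
  intro m
  induction m with
  | zero =>
    intro k juz h1 h2
    have hk : k = 30 := by omega
    subst hk
    have hf : ff surah verse 30 = 30 := by rw [ff_unfold, dif_neg (by omega : ¬ (30:Nat) < 30)]
    rw [hf, if_pos rfl]
    rfl
  | succ m ih =>
    intro k juz h1 h2
    rcases Nat.eq_or_lt_of_le h2 with rfl | hlt
    · have hf : ff surah verse 30 = 30 := by rw [ff_unfold, dif_neg (by omega : ¬ (30:Nat) < 30)]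
      rw [hf, if_pos rfl]
      rfl
    · have hklen : k < JUZ_STARTS.length := by rw [juz_len]; exact hlt
      rw [List.drop_eq_getElem_cons hklen]
      have hget : JUZ_STARTS[k] = JUZ_STARTS.getD k (0, 0) :=
        (List.getD_eq_getElem JUZ_STARTS (0, 0) hklen).symm
      rcases hp : JUZ_STARTS.getD k (0, 0) with ⟨s, v⟩
      rw [hget, hp, juzLoop]
      have hcond_iff : condI surah verse k ↔ (surah > s ∨ (surah = s ∧ verse ≥ v)) := by
        unfold condI
        rw [hp]
      by_cases hc : surah > s ∨ (surah = s ∧ verse ≥ v)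
      · rw [if_pos hc]
        have he : ff surah verse k = ff surah verse (k + 1) := by
          rw [ff_unfold, dif_pos hlt, if_pos (hcond_iff.mpr hc)]
        have hcast : (k : Int) + 1 = ((k + 1 : Nat) : Int) := by push_cast; ring
        rw [hcast, ih (k + 1) ((k + 1 : Nat) : Int) (by omega) (by omega)]
        have hge := ff_ge surah verse 30 (k + 1) (by omega)
        rw [he]
        split_ifs <;> omega
      · rw [if_neg hc]
        have he : ff surah verse k = k := by
          rw [ff_unfold, dif_pos hlt, if_neg (fun h => hc (hcond_iff.mp h))]
        rw [he, if_pos rfl]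

-- B's binary search satisfies the same frontier characterisation
lemma B_char (surah verse : Int) : ∀ fuel lo hi, lo ≤ hi → hi ≤ 30 → hi - lo ≤ fuel →
    (∀ i, i < lo → condI surah verse i) →
    (∀ i, hi ≤ i → i < 30 → ¬ condI surah verse i) →
    (∀ i, i < bisectLoop surah verse fuel lo hi → condI surah verse i) ∧
      bisectLoop surah verse fuel lo hi ≤ 30 ∧
      (∀ i, bisectLoop surah verse fuel lo hi ≤ i → i < 30 → ¬ condI surah verse i) := by
  intro fuel
  induction fuel with
  | zero =>
    intro lo hi h1 h2 h3 H4 H5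
    have hlh : lo = hi := by omega
    subst hlh
    simp only [bisectLoop]
    exact ⟨H4, by omega, H5⟩
  | succ fuel ih =>
    intro lo hi h1 h2 h3 H4 H5
    rw [bisectLoop]
    by_cases hlh : lo < hi
    · rw [if_pos hlh]
      have hmid1 : lo ≤ (lo + hi) / 2 := by omega
      have hmid2 : (lo + hi) / 2 < hi := by omega
      by_cases hb : surah < (JUZ_STARTS.getD ((lo + hi) / 2) (0, 0)).1 ∨
          (surah = (JUZ_STARTS.getD ((lo + hi) / 2) (0, 0)).1 ∧
           verse < (JUZ_STARTS.getD ((lo + hi) / 2) (0, 0)).2)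
      · rw [if_pos hb]
        have hnc : ¬ condI surah verse ((lo + hi) / 2) := by unfold condI; omega
        refine ih lo ((lo + hi) / 2) hmid1 (by omega) (by omega) H4 ?_
        intro i hi1 hi2 hci
        exact hnc (cond_mono surah verse hi1 hi2 hci)
      · rw [if_neg hb]
        have hc : condI surah verse ((lo + hi) / 2) := by unfold condI; omega
        refine ih ((lo + hi) / 2 + 1) hi (by omega) h2 (by omega) ?_ H5
        intro i hi1
        exact cond_mono surah verse (by omega) (by omega) hc
    · rw [if_neg hlh]
      have hlh2 : lo = hi := by omega
      subst hlh2
      exact ⟨H4, by omega, H5⟩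

-- ===== VERDICT (by name: the statement is the Claim_ definition above) =====
theorem get_juz_spec : Claim_equal_get_juz := by
  intro surah verse _
  unfold Spec_get_juz get_juz get_juz_alt
  have hA := A_char surah verse 30 0 1 (by omega) (by omega)
  simp only [List.drop_zero, Nat.cast_zero] at hA
  rw [hA, juz_len]
  have hB := B_char surah verse 30 0 30 (by omega) (by omega) (by omega)
    (fun i hi => absurd hi (by omega)) (fun i hi1 hi2 => absurd hi2 (by omega))
  have hF1 : ∀ i, i < ff surah verse 0 → condI surah verse i :=
    fun i hi => ff_cond surah verse 30 0 (by omega) i (by omega) hi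
  have hF2 : ff surah verse 0 ≤ 30 := ff_le surah verse 30 0 (by omega) (by omega)
  have heq : bisectLoop surah verse 30 0 30 = ff surah verse 0 :=
    char_uniq surah verse _ _ hB.1 hB.2.1 hB.2.2 hF1 hF2 (ff_notcond surah verse)
  rw [heq, max_def]
  split_ifs <;> omega
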